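-- pv_equiv track=rewrite | github.com/Remid66/Basket_Trade_Project | Verification.py | extract_bloom
-- ===== SOURCE A (Python) =====
-- def extract_bloom(val):
--     """Mise en forme du ticker bloom dans un format sans mension "Equity" """
--     val = str(val)
--     val = val.strip().upper()
--     if f"\xa0" in val:
--         val = val.replace(f"\xa0", ' ')
--     if "EQUITY" in val:
--         val =  val.replace('EQUITY','')
--     l = ['-',':',';','.']
--     for i in l:
--         if i in val:
--             val = val.replace(i,' ')
--
--     return val.strip()
-- ===== SOURCE B (Python) =====
-- def extract_bloom(val):
--     """Mise en forme du ticker bloom dans un format sans mension "Equity" """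
--     s = str(val).strip()
--     pat = "EQUITY"
--     out = []
--     buf = ""
--     for ch in s:
--         buf += ch.upper()
--         # drop from the front until buf is a (possibly empty) prefix of the pattern
--         while buf and not pat.startswith(buf):
--             c = buf[0]
--             out.append(' ' if c in '\xa0-:;.' else c)
--             buf = buf[1:]
--         if buf == pat:
--             buf = ""
--     for c in buf:
--         out.append(' ' if c in '\xa0-:;.' else c)
--     return ''.join(out).strip()
-- ===== Notes on version B (the rewrite author's own statement) =====
-- stated objective: alternative
-- what changed: A makes five staged whole-string replace passes (nbsp, the equity tag, and a four-iteration punctuation loop, each a guarded full scan-and-rebuild); B is a single streaming pass: one left-to-right scan with a held-back buffer tracking a prefix of the removed tag (dropping a full match, flushing on mismatch) and mapping each character through the punctuation/nbsp table as it is emitted.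
import Mathlib
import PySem

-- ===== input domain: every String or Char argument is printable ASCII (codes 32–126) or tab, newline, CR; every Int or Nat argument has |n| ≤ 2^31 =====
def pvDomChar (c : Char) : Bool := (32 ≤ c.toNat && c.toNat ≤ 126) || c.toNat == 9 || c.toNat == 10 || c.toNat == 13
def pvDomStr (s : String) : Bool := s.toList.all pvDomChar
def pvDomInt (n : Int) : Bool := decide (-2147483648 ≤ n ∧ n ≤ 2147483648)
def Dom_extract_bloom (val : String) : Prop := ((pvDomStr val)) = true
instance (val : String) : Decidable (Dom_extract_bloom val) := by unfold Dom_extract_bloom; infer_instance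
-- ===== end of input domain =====

-- B replaces A's five staged whole-string replace passes by ONE streaming left-to-right pass
-- with a held-back buffer tracking a prefix of "EQUITY" and a per-character emission table; objective: alternative.


-- ===== PORT A =====
-- str(val) on a string argument is the identity, so it is omitted.
def extract_bloom (val : String) : String :=
  let v1 := PySem.Str.upper (PySem.Str.strip val)
  let v2 := if PySem.Str.isIn "\u00A0" v1 then PySem.Str.replace v1 "\u00A0" " " else v1
  let v3 := if PySem.Str.isIn "EQUITY" v2 then PySem.Str.replace v2 "EQUITY" "" else v2
  let v4 := ["-", ":", ";", "."].foldl
    (fun acc i => if PySem.Str.isIn i acc then PySem.Str.replace acc i " " else acc) v3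
  PySem.Str.strip v4

-- ===== PORT B =====
def patB : List Char := "EQUITY".toList

-- emit: `out.append(' ' if c in '\xa0-:;.' else c)` (membership of the single char in the table string)
def emitB (c : Char) : Char :=
  if PySem.Chars.isIn [c] ("\u00A0-:;.".toList) then ' ' else c

-- `while buf and not pat.startswith(buf): emit buf[0]; buf = buf[1:]`
def flushB (out buf : List Char) : List Char × List Char :=
  match buf with
  | [] => (out, [])
  | c :: t => if List.isPrefixOf (c :: t) patB then (out, c :: t) else flushB (out ++ [emitB c]) t

-- the main `for ch in s` loop; `ch.upper()` is the single-character uppercase (exact on the ASCII domain)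
def bloopB : List Char → List Char → List Char → List Char
  | [], out, buf => buf.foldl (fun o c => o ++ [emitB c]) out   -- final `for c in buf` flush
  | c :: rest, out, buf =>
      let p := flushB out (buf ++ [PySem.Chars.upperChar c])
      if p.2 = patB then bloopB rest p.1 [] else bloopB rest p.1 p.2

def extract_bloom_alt (val : String) : String :=
  let s := PySem.Str.strip val
  PySem.Str.strip (String.ofList (bloopB s.toList [] []))

-- ===== PRECONDITION & SPEC =====
def Spec_extract_bloom (val : String) (out : String) : Prop := out = extract_bloom_alt val
instance (val : String) (out : String) : Decidable (Spec_extract_bloom val out) := by unfold Spec_extract_bloom; infer_instance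

-- ===== CLAIM (what is proved, stated in full; the proofs are below) =====
def Claim_equal_extract_bloom : Prop := ∀ (val : String), Dom_extract_bloom val → Spec_extract_bloom val (extract_bloom val)

-- ===== LEMMAS AND PROOFS =====

-- the translation A's four-pass punctuation loop effects on a single character
def trCharB (c : Char) : Char :=
  if c = '-' ∨ c = ':' ∨ c = ';' ∨ c = '.' then ' ' else c

-- reference semantics of `s.replace("EQUITY", "")`: naive leftmost non-overlapping removal
def rem : List Char → List Char
  | [] => []
  | c :: t =>
    if h : patB.isPrefixOf (c :: t) then rem ((c :: t).drop patB.length)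
    else c :: rem t
termination_by l => l.length
decreasing_by
  · have hp := List.isPrefixOf_iff_prefix.mp h
    have h6 := hp.length_le
    have hpat : patB.length = 6 := by decide
    simp only [List.length_cons, List.length_drop] at *
    omega
  · simp

theorem go_map (a b : Char) : ∀ (fuel : Nat) (l acc : List Char), l.length ≤ fuel →
    PySem.Chars.replace.go [a] [b] fuel l acc = acc.reverse ++ l.map (fun c => if c = a then b else c) := by
  intro fuel
  induction fuel with
  | zero =>
    intro l acc h
    have : l = [] := List.eq_nil_of_length_eq_zero (Nat.le_zero.mp h)
    subst this; simp [PySem.Chars.replace.go]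
  | succ n ih =>
    intro l acc h
    cases l with
    | nil => simp [PySem.Chars.replace.go]
    | cons c t =>
      rw [PySem.Chars.replace.go]
      by_cases hc : c = a
      · subst hc
        simp [List.isPrefixOf, ih t _ (by simpa using h)]
      · simp [List.isPrefixOf, hc, ih t _ (by simpa using h), Ne.symm hc]

theorem go_id (old new : List Char) : ∀ (fuel : Nat) (l acc : List Char), l.length ≤ fuel →
    ¬ old <:+: l → PySem.Chars.replace.go old new fuel l acc = acc.reverse ++ l := by
  intro fuel
  induction fuel with
  | zero =>
    intro l acc h _
    have : l = [] := List.eq_nil_of_length_eq_zero (Nat.le_zero.mp h)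
    subst this; simp [PySem.Chars.replace.go]
  | succ n ih =>
    intro l acc h hinf
    cases l with
    | nil => simp [PySem.Chars.replace.go]
    | cons c t =>
      rw [PySem.Chars.replace.go]
      have hpre : old.isPrefixOf (c :: t) = false := by
        by_contra hx
        exact hinf (List.IsPrefix.isInfix (List.isPrefixOf_iff_prefix.mp (by simpa using hx)))
      rw [hpre]
      simp only [Bool.false_eq_true, if_false]
      rw [ih t _ (by simpa using h) (fun hi => hinf (hi.trans (List.suffix_cons c t).isInfix))]
      simp

-- the EQUITY-removal pass IS the reference removal
theorem go_rem : ∀ (fuel : Nat) (l acc : List Char), l.length ≤ fuel →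
    PySem.Chars.replace.go patB [] fuel l acc = acc.reverse ++ rem l := by
  intro fuel
  induction fuel with
  | zero =>
    intro l acc h
    have : l = [] := List.eq_nil_of_length_eq_zero (Nat.le_zero.mp h)
    subst this; simp [PySem.Chars.replace.go, rem]
  | succ n ih =>
    intro l acc h
    cases l with
    | nil => simp [PySem.Chars.replace.go, rem]
    | cons c t =>
      rw [PySem.Chars.replace.go, rem]
      by_cases hp : patB.isPrefixOf (c :: t)
      · rw [if_pos hp, dif_pos hp, ih _ _ ?_]
        · simp
        · have hpat : patB.length = 6 := by decide
          simp only [List.length_cons, List.length_drop] at *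
          omega
      · rw [if_neg hp, dif_neg hp, ih t _ (by simpa using h)]
        simp

theorem replace_rem (l : List Char) : PySem.Chars.replace l patB [] = rem l := by
  rw [PySem.Chars.replace, if_neg (by decide)]
  simpa using go_rem l.length l [] le_rfl

-- too short to contain the pattern: removal is the identity
theorem rem_short : ∀ (l : List Char), l.length < patB.length → rem l = l := by
  intro l
  induction l with
  | nil => intro _; simp [rem]
  | cons c t ih =>
    intro h
    rw [rem, dif_neg ?_]
    · rw [ih (by simp at h ⊢; omega)]
    · intro hp
      have := (List.isPrefixOf_iff_prefix.mp hp).length_le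
      omega

theorem rem_pat_append (u : List Char) : rem (patB ++ u) = rem u := by
  have hp : patB.isPrefixOf (patB ++ u) := List.isPrefixOf_iff_prefix.mpr (List.prefix_append _ _)
  have hpe : patB = ['E', 'Q', 'U', 'I', 'T', 'Y'] := by decide
  have hlen : patB.length = 6 := by decide
  rw [hpe] at hp
  rw [hpe, List.cons_append, rem, dif_pos (by rw [List.cons_append] at hp; exact hp), hlen]
  simp

theorem rem_subset : ∀ (l : List Char), ∀ c ∈ rem l, c ∈ l := by
  intro l
  induction l using rem.induct with
  | case1 => simp [rem]
  | case2 c t h ih =>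
    rw [rem, dif_pos h]
    intro x hx
    exact List.mem_of_mem_drop (ih x hx)
  | case3 c t h ih =>
    rw [rem, dif_neg h]
    intro x hx
    rcases List.mem_cons.mp hx with hx | hx
    · exact List.mem_cons.mpr (Or.inl hx)
    · exact List.mem_cons.mpr (Or.inr (ih x hx))

-- a failed prefix check means no pattern match can start here
theorem not_pat_prefix (buf u : List Char) (hlen : buf.length ≤ patB.length)
    (h : ¬ List.isPrefixOf buf patB) : ¬ patB.isPrefixOf (buf ++ u) := by
  intro hp
  exact h (List.isPrefixOf_iff_prefix.mpr
    (List.prefix_of_prefix_length_le (List.prefix_append _ _)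
      (List.isPrefixOf_iff_prefix.mp hp) hlen))

-- the while-loop: emitted chars are exactly what removal would emit
theorem flushB_spec : ∀ (buf out : List Char), buf.length ≤ patB.length →
    List.isPrefixOf (flushB out buf).2 patB = true ∧
    ∀ u, (flushB out buf).1 ++ (rem ((flushB out buf).2 ++ u)).map emitB
        = out ++ (rem (buf ++ u)).map emitB := by
  intro buf
  induction buf with
  | nil =>
    intro out _
    refine ⟨by simp [flushB], fun u => by simp [flushB]⟩
  | cons c t ih =>
    intro out hlen
    by_cases hp : List.isPrefixOf (c :: t) patB
    · have he : flushB out (c :: t) = (out, c :: t) := by simp only [flushB, if_pos hp]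
      rw [he]
      exact ⟨hp, fun u => rfl⟩
    · simp only [flushB, if_neg hp]
      obtain ⟨h1, h2⟩ := ih (out ++ [emitB c]) (by simp at hlen ⊢; omega)
      refine ⟨h1, fun u => ?_⟩
      have hnm : ¬ patB.isPrefixOf ((c :: t) ++ u) := not_pat_prefix (c :: t) u hlen hp
      have hr : rem ((c :: t) ++ u) = c :: rem (t ++ u) := by
        rw [List.cons_append, rem, dif_neg (by simpa using hnm)]
      rw [hr, h2 u]
      simp

-- the main loop computes the removal composed with the emission table, in one pass
theorem bloopB_spec : ∀ (rest out buf : List Char),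
    List.isPrefixOf buf patB = true → buf ≠ patB →
    bloopB rest out buf = out ++ (rem (buf ++ rest.map PySem.Chars.upperChar)).map emitB := by
  intro rest
  induction rest with
  | nil =>
    intro out buf hpre hne
    have hlt : buf.length < patB.length := by
      have hle := (List.isPrefixOf_iff_prefix.mp hpre).length_le
      rcases Nat.lt_or_ge buf.length patB.length with h | h
      · exact h
      · exact absurd ((List.isPrefixOf_iff_prefix.mp hpre).eq_of_length_le h) hne
    simp only [bloopB, List.map_nil, List.append_nil, rem_short buf hlt]
    exact PySem.List.foldl_append_singleton_eq_map emitB buf out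
  | cons c rest ih =>
    intro out buf hpre hne
    have hlt : buf.length < patB.length := by
      have hle := (List.isPrefixOf_iff_prefix.mp hpre).length_le
      rcases Nat.lt_or_ge buf.length patB.length with h | h
      · exact h
      · exact absurd ((List.isPrefixOf_iff_prefix.mp hpre).eq_of_length_le h) hne
    obtain ⟨h1, h2⟩ := flushB_spec (buf ++ [PySem.Chars.upperChar c]) out (by simp; omega)
    simp only [bloopB]
    have hassoc : buf ++ (c :: rest).map PySem.Chars.upperChar
        = (buf ++ [PySem.Chars.upperChar c]) ++ rest.map PySem.Chars.upperChar := by simp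
    by_cases hfull : (flushB out (buf ++ [PySem.Chars.upperChar c])).2 = patB
    · rw [if_pos hfull, ih _ [] (by decide) (by decide)]
      have := h2 (rest.map PySem.Chars.upperChar)
      rw [hfull, rem_pat_append] at this
      rw [List.nil_append, this, hassoc]
    · rw [if_neg hfull, ih _ _ h1 hfull, h2 (rest.map PySem.Chars.upperChar), hassoc]

-- replace of an absent (nonempty) pattern is the identity
theorem replace_not_infix (old new s : List Char) (h0 : old ≠ []) (h : ¬ old <:+: s) :
    PySem.Chars.replace s old new = s := by
  rw [PySem.Chars.replace, if_neg (by simp [h0])]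
  simpa using go_id old new s.length s [] le_rfl h

-- replacing a single character is one per-character pass
theorem replace_single (a b : Char) (s : List Char) :
    PySem.Chars.replace s [a] [b] = s.map (fun c => if c = a then b else c) := by
  simp [PySem.Chars.replace]
  exact go_map a b s.length s [] le_rfl

-- A's guarded single-character replace equals the unconditional per-character pass
theorem condreplace (a b : Char) (s : List Char) :
    (if PySem.Chars.isIn [a] s = true then PySem.Chars.replace s [a] [b] else s)
      = s.map (fun c => if c = a then b else c) := by
  by_cases h : PySem.Chars.isIn [a] s = true
  · rw [if_pos h, replace_single]
  · rw [if_neg h]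
    have hmem : a ∉ s := by
      have := (PySem.Chars.isIn_eq_false_iff _ _).mp (by simpa using h)
      simpa [List.singleton_infix_iff] using this
    have hms : s.map (fun c => if c = a then b else c) = s := by
      conv_rhs => rw [← List.map_id s]
      apply List.map_congr_left
      intro c hc
      have hne : c ≠ a := fun hca => hmem (hca ▸ hc)
      simp [hne]
    exact hms.symm

-- chars of the upper-cased Dom string are never U+00A0
theorem upperChar_dom_ne (c : Char) (h : pvDomChar c = true) :
    PySem.Chars.upperChar c ≠ '\u00A0' := by
  have hle : c.toNat ≤ 126 ∨ c.toNat = 9 ∨ c.toNat = 10 ∨ c.toNat = 13 := by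
    simp [pvDomChar] at h; omega
  intro hx
  unfold PySem.Chars.upperChar at hx
  have h160 : (('\u00A0' : Char)).toNat = 160 := by decide
  split at hx
  · have hv : Nat.isValidChar (c.toNat - 32) := Or.inl (by omega)
    have htn := Char.toNat_ofNat (c.toNat - 32)
    rw [if_pos hv, hx, h160] at htn
    omega
  · subst hx
    rw [h160] at hle
    omega

theorem strip_mem (c : Char) (l : List Char) (h : c ∈ PySem.Chars.strip l) : c ∈ l := by
  simp only [PySem.Chars.strip, PySem.Chars.rstrip, PySem.Chars.lstrip] at h
  rw [List.mem_reverse] at h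
  have h1 := (List.dropWhile_sublist _).mem h
  rw [List.mem_reverse] at h1
  exact (List.dropWhile_sublist _).mem h1

theorem nbsp_not_infix (val : String) (hdom : Dom_extract_bloom val) :
    ¬ ([('\u00A0' : Char)] <:+: PySem.Chars.upper (PySem.Chars.strip val.toList)) := by
  rw [List.singleton_infix_iff]
  intro hmem
  simp only [PySem.Chars.upper, List.mem_map] at hmem
  obtain ⟨c, hc, hce⟩ := hmem
  have hdomc : pvDomChar c = true := by
    have := (List.all_eq_true.mp hdom) c (strip_mem c _ hc)
    simpa using this
  exact upperChar_dom_ne c hdomc hce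

-- on chars other than U+00A0 B's emission table and A's punctuation translation agree
theorem emitB_eq_tr (c : Char) (h : c ≠ '\u00A0') : emitB c = trCharB c := by
  unfold emitB trCharB
  by_cases h1 : c = '-'; · subst h1; decide
  by_cases h2 : c = ':'; · subst h2; decide
  by_cases h3 : c = ';'; · subst h3; decide
  by_cases h4 : c = '.'; · subst h4; decide
  have hni : PySem.Chars.isIn [c] ("\u00A0-:;.".toList) = false := by
    apply (PySem.Chars.isIn_eq_false_iff _ _).mpr
    rw [List.singleton_infix_iff]
    intro hmem
    have : ("\u00A0-:;.".toList) = ['\u00A0', '-', ':', ';', '.'] := by decide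
    rw [this] at hmem
    simp at hmem
    tauto
  rw [hni]
  simp [h1, h2, h3, h4]

-- the composition of the four single-character passes IS the translation table
theorem four_maps_eq_tr (u : List Char) :
    (((u.map (fun c => if c = '-' then ' ' else c)).map (fun c => if c = ':' then ' ' else c)).map
        (fun c => if c = ';' then ' ' else c)).map (fun c => if c = '.' then ' ' else c)
      = u.map trCharB := by
  simp only [List.map_map]
  apply List.map_congr_left
  intro c _
  simp only [Function.comp, trCharB]
  by_cases h1 : c = '-' <;> by_cases h2 : c = ':' <;> by_cases h3 : c = ';' <;> by_cases h4 : c = '.' <;>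
    simp_all

-- one guarded single-character replace step of A's loop, on the list of characters
theorem step_toList (p : String) (a : Char) (hp : p.toList = [a]) (acc : String) :
    (if PySem.Str.isIn p acc then PySem.Str.replace acc p " " else acc).toList
      = acc.toList.map (fun c => if c = a then ' ' else c) := by
  rw [← condreplace a ' ' acc.toList]
  by_cases h : PySem.Chars.isIn [a] acc.toList = true
  · have hg : PySem.Str.isIn p acc = true := by simp [PySem.Str.isIn_eq, hp, h]
    rw [if_pos hg, if_pos h]
    simp [PySem.Str.toList_replace, hp]
  · have hg : ¬ (PySem.Str.isIn p acc = true) := by simp [PySem.Str.isIn_eq, hp, h]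
    rw [if_neg hg, if_neg h]

-- A's whole punctuation loop is one translation pass
theorem foldl_tr (w : String) :
    ["-", ":", ";", "."].foldl
        (fun acc i => if PySem.Str.isIn i acc then PySem.Str.replace acc i " " else acc) w
      = String.ofList (w.toList.map trCharB) := by
  apply String.toList_inj.mp
  simp only [List.foldl]
  rw [step_toList "." '.' (by decide), step_toList ";" ';' (by decide),
    step_toList ":" ':' (by decide), step_toList "-" '-' (by decide)]
  rw [four_maps_eq_tr]
  simp

-- ===== VERDICT (by name: the statement is the Claim_ definition above) =====
set_option maxHeartbeats 1600000 in
theorem extract_bloom_spec : Claim_equal_extract_bloom := by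
  intro val hdom
  unfold Spec_extract_bloom extract_bloom extract_bloom_alt
  dsimp only
  -- reduce B to: strip (map emitB (rem (upper (strip v))))
  rw [bloopB_spec _ [] [] (by decide) (by decide)]
  -- reduce A: the nbsp pass is the identity on Dom
  have hnb := nbsp_not_infix val hdom
  have hg : PySem.Str.isIn "\u00A0" (PySem.Str.upper (PySem.Str.strip val)) = false := by
    simp only [PySem.Str.isIn_eq, PySem.Str.toList_upper, PySem.Str.toList_strip]
    exact (PySem.Chars.isIn_eq_false_iff _ _).mpr (by simpa using hnb)
  have hrep : PySem.Str.replace (PySem.Str.upper (PySem.Str.strip val)) "\u00A0" " "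
      = PySem.Str.upper (PySem.Str.strip val) := by
    apply String.toList_inj.mp
    simp only [PySem.Str.toList_replace, PySem.Str.toList_upper, PySem.Str.toList_strip]
    exact replace_not_infix _ _ _ (by decide) (by simpa using hnb)
  rw [hrep]
  simp only [hg, Bool.false_eq_true, if_false]
  -- the EQUITY pass (guarded or not) is rem
  have hEQ : (if PySem.Str.isIn "EQUITY" (PySem.Str.upper (PySem.Str.strip val)) = true then
        PySem.Str.replace (PySem.Str.upper (PySem.Str.strip val)) "EQUITY" "" else
        PySem.Str.upper (PySem.Str.strip val)).toList
      = rem (PySem.Chars.upper (PySem.Chars.strip val.toList)) := by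
    by_cases hE : PySem.Str.isIn "EQUITY" (PySem.Str.upper (PySem.Str.strip val)) = true
    · rw [if_pos hE]
      simp only [PySem.Str.toList_replace, PySem.Str.toList_upper, PySem.Str.toList_strip]
      exact replace_rem _
    · rw [if_neg hE]
      simp only [PySem.Str.toList_upper, PySem.Str.toList_strip]
      rw [← replace_rem]
      refine (replace_not_infix _ _ _ (by decide) ?_).symm
      have hEf : PySem.Str.isIn "EQUITY" (PySem.Str.upper (PySem.Str.strip val)) = false := by
        simpa using hE
      have := (PySem.Chars.isIn_eq_false_iff _ _).mp (by
        simpa [PySem.Str.isIn_eq, PySem.Str.toList_upper, PySem.Str.toList_strip] using hEf)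
      simpa [patB] using this
  rw [foldl_tr]
  apply String.toList_inj.mp
  simp only [PySem.Str.toList_strip, String.toList_ofList, hEQ, List.nil_append]
  -- both sides are strip of a char map of the same removal result; the maps agree on Dom
  have hu : (PySem.Chars.strip val.toList).map PySem.Chars.upperChar
      = PySem.Chars.upper (PySem.Chars.strip val.toList) := by
    simp [PySem.Chars.upper]
  rw [hu]
  have hmap : (rem (PySem.Chars.upper (PySem.Chars.strip val.toList))).map emitB
      = (rem (PySem.Chars.upper (PySem.Chars.strip val.toList))).map trCharB := by
    apply List.map_congr_left
    intro c hc
    refine emitB_eq_tr c ?_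
    have hmem := rem_subset _ c hc
    simp only [PySem.Chars.upper, List.mem_map] at hmem
    obtain ⟨d, hd, hde⟩ := hmem
    have hdd : pvDomChar d = true := by
      have := (List.all_eq_true.mp hdom) d (strip_mem d _ hd)
      simpa using this
    exact hde ▸ upperChar_dom_ne d hdd
  rw [hmap]
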